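-- pv_equiv track=rewrite | github.com/AmirMDEV/subtitle-tool | src/local_subtitle_stack/utils.py | split_text_lines
-- ===== SOURCE A (Python) =====
-- def split_text_lines(text: str, max_chars: int) -> str:
--     words = text.split()
--     if not words or len(text) <= max_chars:
--         return text.strip()
--
--     lines: list[str] = []
--     current: list[str] = []
--     current_len = 0
--     for word in words:
--         projected = current_len + len(word) + (1 if current else 0)
--         if current and projected > max_chars and len(lines) < 1:
--             lines.append(" ".join(current))
--             current = [word]
--             current_len = len(word)
--         else:
--             current.append(word)
--             current_len = projected
--     if current:
--         lines.append(" ".join(current))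
--     return "\n".join(lines[:2]).strip()
-- ===== SOURCE B (Python) =====
-- def split_text_lines(text: str, max_chars: int) -> str:
--     words = text.split()
--     if not words or len(text) <= max_chars:
--         return text.strip()
--     # one pass: find the first index k (k >= 1) where the joined prefix overflows
--     k = None
--     acc = len(words[0])
--     for i in range(1, len(words)):
--         acc = acc + 1 + len(words[i])
--         if acc > max_chars:
--             k = i
--             break
--     if k is None:
--         line = " ".join(words)
--     else:
--         line = " ".join(words[:k]) + "\n" + " ".join(words[k:])
--     return line.strip()
-- ===== Notes on version B (the rewrite author's own statement) =====
-- stated objective: alternative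
-- what changed: Replaces A's accumulator loop (mutable lines/current lists with a break-disabling len(lines)<1 flag) by two phases: a numeric scan that only finds the first overflow index k, then slice-and-join words[:k]/words[k:] to build the output.
import Mathlib
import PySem

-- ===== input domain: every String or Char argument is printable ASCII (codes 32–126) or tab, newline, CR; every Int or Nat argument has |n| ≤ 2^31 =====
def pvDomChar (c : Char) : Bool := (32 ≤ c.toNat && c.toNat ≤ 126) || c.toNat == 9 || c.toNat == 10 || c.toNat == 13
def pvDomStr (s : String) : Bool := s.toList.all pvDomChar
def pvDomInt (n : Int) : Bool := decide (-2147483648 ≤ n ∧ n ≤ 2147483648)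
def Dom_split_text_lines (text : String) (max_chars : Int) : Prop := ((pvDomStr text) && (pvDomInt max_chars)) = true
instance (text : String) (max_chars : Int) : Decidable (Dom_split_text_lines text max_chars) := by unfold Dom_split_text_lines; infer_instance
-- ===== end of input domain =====

-- B replaces A's interleaved accumulator loop by a numeric scan for the split index
-- followed by slice-and-join; equivalence of the return values is proved below.

-- ===== PORT A =====
def pvStepA (max_chars : Int) (st : List String × List String × Int) (word : String) :
    List String × List String × Int :=
  let projected := st.2.2 + PySem.Str.len word + (if st.2.1 ≠ [] then 1 else 0)
  if st.2.1 ≠ [] ∧ projected > max_chars ∧ st.1.length < 1 then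
    (st.1 ++ [PySem.Str.join " " st.2.1], [word], PySem.Str.len word)
  else
    (st.1, st.2.1 ++ [word], projected)

def split_text_lines (text : String) (max_chars : Int) : String :=
  let words := PySem.Str.split₀ text
  if words = [] ∨ PySem.Str.len text ≤ max_chars then
    PySem.Str.strip text
  else
    let st := words.foldl (pvStepA max_chars) ([], [], 0)
    let lines := if st.2.1 ≠ [] then st.1 ++ [PySem.Str.join " " st.2.1] else st.1
    PySem.Str.strip (PySem.Str.join "\n" (PySem.List.slice lines none (some 2)))

-- ===== PORT B =====
-- scan for the first index (offset into the tail) where the joined prefix overflows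
def pvFindSplit (max_chars : Int) (acc : Int) : List String → Option Nat
  | [] => none
  | w :: ws =>
    let acc' := acc + 1 + PySem.Str.len w
    if acc' > max_chars then some 0 else (pvFindSplit max_chars acc' ws).map (· + 1)

def split_text_lines_alt (text : String) (max_chars : Int) : String :=
  match PySem.Str.split₀ text with
  | [] => PySem.Str.strip text
  | w0 :: rest =>
    if PySem.Str.len text ≤ max_chars then PySem.Str.strip text
    else
      let line :=
        match pvFindSplit max_chars (PySem.Str.len w0) rest with
        | none => PySem.Str.join " " (w0 :: rest)
        | some j =>
            PySem.Str.join " " ((w0 :: rest).take (j + 1)) ++ "\n" ++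
              PySem.Str.join " " ((w0 :: rest).drop (j + 1))
      PySem.Str.strip line

-- ===== PRECONDITION & SPEC =====
def Spec_split_text_lines (text : String) (max_chars : Int) (out : String) : Prop := out = split_text_lines_alt text max_chars
instance (text : String) (max_chars : Int) (out : String) : Decidable (Spec_split_text_lines text max_chars out) := by unfold Spec_split_text_lines; infer_instance

-- ===== CLAIM (what is proved, stated in full; the proofs are below) =====
def Claim_equal_split_text_lines : Prop := ∀ (text : String) (max_chars : Int), Dom_split_text_lines text max_chars → Spec_split_text_lines text max_chars (split_text_lines text max_chars)


-- ===== LEMMAS AND PROOFS =====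

-- once a line has been committed, A's loop only ever appends to `current`
theorem pvFoldA_post (mx : Int) (rest : List String) (l1 : String) :
    ∀ (cur : List String) (n : Int), cur ≠ [] →
      ∃ m, rest.foldl (pvStepA mx) ([l1], cur, n) = ([l1], cur ++ rest, m) := by
  induction rest with
  | nil => intro cur n _; exact ⟨n, by simp⟩
  | cons w rest ih =>
    intro cur n hcur
    have hstep : pvStepA mx ([l1], cur, n) w
        = ([l1], cur ++ [w], n + (w.length : Int) + if cur = [] then 0 else 1) := by
      simp [pvStepA]
    obtain ⟨m, hm⟩ := ih (cur ++ [w]) (n + (w.length : Int) + if cur = [] then 0 else 1)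
      (by simp)
    refine ⟨m, ?_⟩
    rw [List.foldl_cons, hstep, hm]
    simp

-- before any split, A's loop result is characterised by pvFindSplit
theorem pvFoldA_pre (mx : Int) :
    ∀ (rest cur : List String) (n : Int), cur ≠ [] →
      (let st := rest.foldl (pvStepA mx) ([], cur, n)
       if st.2.1 ≠ [] then st.1 ++ [PySem.Str.join " " st.2.1] else st.1)
      = match pvFindSplit mx n rest with
        | none => [PySem.Str.join " " (cur ++ rest)]
        | some j => [PySem.Str.join " " (cur ++ rest.take j),
                     PySem.Str.join " " (rest.drop j)] := by
  intro rest
  induction rest with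
  | nil => intro cur n hcur; simp [pvFindSplit, hcur]
  | cons w rest ih =>
    intro cur n hcur
    by_cases hov : mx < n + (w.length : Int) + 1
    · have hstep : pvStepA mx ([], cur, n) w
          = ([PySem.Str.join " " cur], [w], (w.length : Int)) := by
        simp [pvStepA, hcur]
        omega
      obtain ⟨m, hm⟩ := pvFoldA_post mx rest (PySem.Str.join " " cur) [w] ((w.length : Int))
        (by simp)
      have hfs : pvFindSplit mx n (w :: rest) = some 0 := by
        simp only [pvFindSplit, PySem.Str.len_eq, String.length_toList]
        rw [if_pos (by omega)]
      simp only [List.foldl_cons, hstep, hm, hfs]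
      simp
    · have hstep : pvStepA mx ([], cur, n) w
          = ([], cur ++ [w], n + (w.length : Int) + 1) := by
        simp [pvStepA, hcur]
        omega
      have hfs : pvFindSplit mx n (w :: rest)
          = (pvFindSplit mx (n + (w.length : Int) + 1) rest).map (· + 1) := by
        simp only [pvFindSplit, PySem.Str.len_eq, String.length_toList]
        rw [if_neg (by omega)]
        rw [show n + 1 + (w.length : Int) = n + (w.length : Int) + 1 by ring]
      have hih := ih (cur ++ [w]) (n + (w.length : Int) + 1) (by simp)
      simp only [List.foldl_cons, hstep, hfs]
      simp only at hih
      rw [hih]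
      cases pvFindSplit mx (n + (w.length : Int) + 1) rest with
      | none => simp
      | some j => simp

theorem pvJoin_singleton (a : String) : PySem.Str.join "\n" [a] = a := by
  apply String.toList_injective
  simp [PySem.Chars.join_singleton]

theorem pvJoin_pair (a b : String) : PySem.Str.join "\n" [a, b] = a ++ "\n" ++ b := by
  apply String.toList_injective
  simp [PySem.Chars.join_cons_cons, PySem.Chars.join_singleton]

-- ===== VERDICT (by name: the statement is the Claim_ definition above) =====
theorem split_text_lines_spec : Claim_equal_split_text_lines := by
  intro text mx _
  unfold Spec_split_text_lines split_text_lines split_text_lines_alt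
  cases hw : PySem.Str.split₀ text with
  | nil => simp
  | cons w0 rest =>
    simp only [PySem.Str.len_eq, String.length_toList]
    by_cases hle : (text.length : Int) ≤ mx
    · simp [hle]
    · rw [if_neg (by simp [hle]), if_neg hle]
      have hstep0 : pvStepA mx ([], [], 0) w0 = ([], [w0], (w0.length : Int)) := by
        simp [pvStepA]
      have hmain := pvFoldA_pre mx rest [w0] ((w0.length : Int)) (by simp)
      simp only [List.foldl_cons, hstep0]
      simp only at hmain
      rw [hmain]
      cases hfs : pvFindSplit mx ((w0.length : Int)) rest with
      | none => simp [PySem.List.slice, pvJoin_singleton]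
      | some j => simp [PySem.List.slice, pvJoin_pair]
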